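-- pv_equiv track=rewrite | github.com/poslevkusie7/NEPHIX | src/assistant_core.py | _has_transition_words
-- ===== SOURCE A (Python) =====
-- def _has_transition_words(text: str) -> bool:
--     transitions = [
--         "however",
--         "therefore",
--         "furthermore",
--         "moreover",
--         "in addition",
--         "consequently",
--         "thus",
--         "meanwhile",
--     ]
--     text_lower = text.lower()
--     return any(transition in text_lower for transition in transitions)
-- ===== SOURCE B (Python) =====
-- def _has_transition_words(text: str) -> bool:
--     transitions = [
--         "however",
--         "therefore",
--         "furthermore",
--         "moreover",
--         "in addition",
--         "consequently",
--         "thus",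
--         "meanwhile",
--     ]
--     t = text.lower()
--     for i in range(len(t)):
--         for tr in transitions:
--             if t.startswith(tr, i):
--                 return True
--     return False
-- ===== Notes on version B (the rewrite author's own statement) =====
-- stated objective: alternative
-- what changed: Instead of eight separate full substring searches over the lowered text, B makes one left-to-right scan over positions, testing at each position whether any of the eight phrases starts there (early exit on first hit).
import Mathlib
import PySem

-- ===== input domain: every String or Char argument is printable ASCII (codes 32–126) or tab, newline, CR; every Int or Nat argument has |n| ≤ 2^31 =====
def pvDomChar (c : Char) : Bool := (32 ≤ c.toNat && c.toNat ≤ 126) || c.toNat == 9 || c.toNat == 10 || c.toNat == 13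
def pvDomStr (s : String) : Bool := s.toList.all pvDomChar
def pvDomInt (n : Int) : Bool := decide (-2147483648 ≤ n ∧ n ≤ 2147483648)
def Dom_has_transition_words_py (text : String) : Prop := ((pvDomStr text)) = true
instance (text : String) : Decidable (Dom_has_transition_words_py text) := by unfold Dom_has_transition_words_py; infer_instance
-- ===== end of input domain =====

-- B replaces A's eight separate substring searches by ONE left-to-right scan over positions,
-- checking at each position whether any phrase starts there (alternative, same cost class).

-- ===== PORT A =====
def pvTransitions : List String :=
  ["however", "therefore", "furthermore", "moreover",
   "in addition", "consequently", "thus", "meanwhile"]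

def has_transition_words_py (text : String) : Bool :=
  let text_lower := PySem.Str.lower text
  pvTransitions.any (fun transition => PySem.Str.isIn transition text_lower)

-- ===== PORT B =====
def pvTransitionsB : List (List Char) :=
  ["however".toList, "therefore".toList, "furthermore".toList, "moreover".toList,
   "in addition".toList, "consequently".toList, "thus".toList, "meanwhile".toList]

-- the inner 'for tr in transitions: if t.startswith(tr, i)' test at one position
def pvCheckAt (s : List Char) : Bool :=
  pvTransitionsB.any (fun tr => PySem.Chars.startswith s tr)

-- the outer 'for i in range(len(t))' loop, as structural recursion over the suffixes of t
def pvScan : List Char → Bool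
  | [] => false
  | c :: t => pvCheckAt (c :: t) || pvScan t

def has_transition_words_py_alt (text : String) : Bool :=
  pvScan (PySem.Str.lower text).toList

-- ===== PRECONDITION & SPEC =====
def Spec_has_transition_words_py (text : String) (out : Bool) : Prop := out = has_transition_words_py_alt text
instance (text : String) (out : Bool) : Decidable (Spec_has_transition_words_py text out) := by unfold Spec_has_transition_words_py; infer_instance

-- ===== CLAIM (what is proved, stated in full; the proofs are below) =====
def Claim_equal_has_transition_words_py : Prop := ∀ (text : String), Dom_has_transition_words_py text → Spec_has_transition_words_py text (has_transition_words_py text)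

-- ===== LEMMAS AND PROOFS =====

-- all eight phrases are nonempty
theorem pvTransitionsB_ne_nil : ∀ p ∈ pvTransitionsB, p ≠ [] := by decide

-- the position scan finds exactly the suffix positions where some phrase is a prefix
theorem pvScan_iff (s : List Char) :
    pvScan s = true ↔ ∃ p ∈ pvTransitionsB, ∃ j, PySem.Chars.startswith (s.drop j) p = true := by
  induction s with
  | nil =>
    simp only [pvScan]
    refine ⟨fun h => by simp at h, ?_⟩
    rintro ⟨p, hp, j, hj⟩
    rw [List.drop_nil, PySem.Chars.startswith_iff, List.prefix_nil] at hj
    exact absurd hj (pvTransitionsB_ne_nil p hp)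
  | cons c t ih =>
    simp only [pvScan, Bool.or_eq_true, ih, pvCheckAt, List.any_eq_true]
    constructor
    · rintro (⟨p, hp, hs⟩ | ⟨p, hp, j, hj⟩)
      · exact ⟨p, hp, 0, hs⟩
      · exact ⟨p, hp, j + 1, by simpa using hj⟩
    · rintro ⟨p, hp, j, hj⟩
      cases j with
      | zero => exact Or.inl ⟨p, hp, by simpa using hj⟩
      | succ j => exact Or.inr ⟨p, hp, j, by simpa using hj⟩

-- the B-side phrase list is the A-side one, character-wise
theorem pvTransitionsB_eq : pvTransitionsB = pvTransitions.map String.toList := by decide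

theorem pv_main (s : String) : has_transition_words_py s = has_transition_words_py_alt s := by
  unfold has_transition_words_py has_transition_words_py_alt
  rw [Bool.eq_iff_iff]
  simp only [pvScan_iff, pvTransitionsB_eq, List.mem_map, List.any_eq_true]
  constructor
  · rintro ⟨tr, htr, hin⟩
    refine ⟨tr.toList, ⟨tr, htr, rfl⟩, ?_⟩
    rw [PySem.Str.isIn_iff_infix] at hin
    have := (PySem.Chars.exists_prefix_drop_iff_isIn
        (sub := tr.toList) (s := (PySem.Str.lower s).toList)).2
        (by rw [PySem.Chars.isIn_iff_infix]; exact hin)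
    obtain ⟨j, hj⟩ := this
    exact ⟨j, by rw [PySem.Chars.startswith_iff]; exact hj⟩
  · rintro ⟨p, ⟨tr, htr, rfl⟩, j, hj⟩
    refine ⟨tr, htr, ?_⟩
    rw [PySem.Chars.startswith_iff] at hj
    rw [PySem.Str.isIn_iff_infix, ← PySem.Chars.isIn_iff_infix]
    exact (PySem.Chars.exists_prefix_drop_iff_isIn _ _).1 ⟨j, hj⟩

-- ===== VERDICT (by name: the statement is the Claim_ definition above) =====
theorem has_transition_words_py_spec : Claim_equal_has_transition_words_py := by
  intro text _
  exact pv_main text
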